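-- pv_equiv track=rewrite | github.com/qwertyregion/FlaskProject | app/middleware/security.py | is_suspicious_url
-- ===== SOURCE A (Python) =====
-- def is_suspicious_url(url):
--     """Проверяет подозрительные URL"""
--     suspicious_patterns = [
--         '../', '..\\', 'admin', 'wp-admin', 'phpmyadmin',
--         'config', 'backup', 'test', 'debug', 'api/',
--         'script', 'javascript:', 'data:'
--     ]
--
--     url_lower = url.lower()
--     return any(pattern in url_lower for pattern in suspicious_patterns)
-- ===== SOURCE B (Python) =====
-- def is_suspicious_url(url):
--     """Position-major single scan: at each index of the lowered URL, check
--     whether any suspicious pattern starts there (instead of one full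
--     substring search per pattern)."""
--     suspicious_patterns = [
--         '../', '..\\', 'admin', 'wp-admin', 'phpmyadmin',
--         'config', 'backup', 'test', 'debug', 'api/',
--         'script', 'javascript:', 'data:'
--     ]
--     u = url.lower()
--     return any(u.startswith(p, i)
--                for i in range(len(u))
--                for p in suspicious_patterns)
-- ===== Notes on version B (the rewrite author's own statement) =====
-- stated objective: alternative
-- what changed: Swapped the traversal: instead of running a separate full substring search for each of the 13 patterns, B lowers the URL once and makes a single position-major pass, testing at each index whether any pattern starts there.
import Mathlib
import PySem

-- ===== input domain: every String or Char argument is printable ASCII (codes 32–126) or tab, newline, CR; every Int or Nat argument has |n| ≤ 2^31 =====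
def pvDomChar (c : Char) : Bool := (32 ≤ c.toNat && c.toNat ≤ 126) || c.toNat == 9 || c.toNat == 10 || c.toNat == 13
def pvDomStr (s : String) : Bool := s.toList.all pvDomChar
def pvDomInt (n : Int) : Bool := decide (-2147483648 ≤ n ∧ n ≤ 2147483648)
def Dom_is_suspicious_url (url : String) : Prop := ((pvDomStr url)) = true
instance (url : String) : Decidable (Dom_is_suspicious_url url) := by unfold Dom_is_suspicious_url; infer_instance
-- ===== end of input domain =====

-- B replaces A's per-pattern substring searches by one position-major scan of the
-- lowered URL (objective: alternative traversal, same cost class).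

-- ===== PORT A =====
def pvSuspiciousPatterns : List String :=
  ["../", "..\\", "admin", "wp-admin", "phpmyadmin",
   "config", "backup", "test", "debug", "api/",
   "script", "javascript:", "data:"]

def is_suspicious_url (url : String) : Bool :=
  let url_lower := PySem.Str.lower url
  pvSuspiciousPatterns.any (fun pattern => PySem.Str.isIn pattern url_lower)

-- ===== PORT B =====
-- the 'for i in range(len(u))' loop as structural recursion over the suffixes of u
def pvScan (s : List Char) : Bool :=
  match s with
  | [] => false
  | _ :: rest =>
    pvSuspiciousPatterns.any (fun p => PySem.Chars.startswith s p.toList) || pvScan rest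

def is_suspicious_url_alt (url : String) : Bool :=
  pvScan (PySem.Str.lower url).toList

-- ===== PRECONDITION & SPEC =====
def Spec_is_suspicious_url (url : String) (out : Bool) : Prop := out = is_suspicious_url_alt url
instance (url : String) (out : Bool) : Decidable (Spec_is_suspicious_url url out) := by unfold Spec_is_suspicious_url; infer_instance

-- ===== CLAIM (what is proved, stated in full; the proofs are below) =====
def Claim_equal_is_suspicious_url : Prop := ∀ (url : String), Dom_is_suspicious_url url → Spec_is_suspicious_url url (is_suspicious_url url)

-- ===== LEMMAS AND PROOFS =====

-- A nonempty pattern is in c :: rest iff it starts there or is in rest.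
theorem pvIsIn_cons (p : List Char) (_hp : p ≠ []) (c : Char) (rest : List Char) :
    PySem.Chars.isIn p (c :: rest)
      = (PySem.Chars.startswith (c :: rest) p || PySem.Chars.isIn p rest) := by
  rcases h : PySem.Chars.isIn p (c :: rest) with _ | _
  · rw [PySem.Chars.isIn_eq_false_iff] at h
    rw [List.infix_cons_iff] at h
    push Not at h
    symm
    simp only [Bool.or_eq_false_iff]
    constructor
    · rw [← Bool.not_eq_true, PySem.Chars.startswith_iff]; exact h.1
    · rw [PySem.Chars.isIn_eq_false_iff]; exact h.2
  · rw [PySem.Chars.isIn_iff_infix, List.infix_cons_iff] at h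
    symm
    rcases h with h | h
    · rw [Bool.or_eq_true]; left; rw [PySem.Chars.startswith_iff]; exact h
    · rw [Bool.or_eq_true]; right; rw [PySem.Chars.isIn_iff_infix]; exact h

theorem pvScan_eq (s : List Char) :
    pvScan s = pvSuspiciousPatterns.any (fun p => PySem.Chars.isIn p.toList s) := by
  induction s with
  | nil =>
    simp only [pvScan]
    symm
    rw [List.any_eq_false]
    intro p _hp
    rw [Bool.not_eq_true, PySem.Chars.isIn_eq_false_iff]
    intro hinf
    have : p.toList = [] := List.eq_nil_of_infix_nil hinf
    fin_cases _hp <;> simp_all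
  | cons c rest ih =>
    simp only [pvScan, ih]
    have hne : ∀ p ∈ pvSuspiciousPatterns, p.toList ≠ [] := by decide
    rcases hA : pvSuspiciousPatterns.any (fun p => PySem.Chars.isIn p.toList (c :: rest)) with _ | _
    · rw [List.any_eq_false] at hA
      rw [Bool.or_eq_false_iff]
      constructor
      · rw [List.any_eq_false]
        intro p hp
        have := hA p hp
        rw [Bool.not_eq_true, pvIsIn_cons p.toList (hne p hp) c rest] at this
        simpa using (Bool.or_eq_false_iff.mp this).1
      · rw [List.any_eq_false]
        intro p hp
        have := hA p hp
        rw [Bool.not_eq_true, pvIsIn_cons p.toList (hne p hp) c rest] at this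
        simpa using (Bool.or_eq_false_iff.mp this).2
    · rw [List.any_eq_true] at hA
      obtain ⟨p, hp, hIn⟩ := hA
      rw [pvIsIn_cons p.toList (hne p hp) c rest, Bool.or_eq_true] at hIn
      rw [Bool.or_eq_true]
      rcases hIn with h | h
      · left; rw [List.any_eq_true]; exact ⟨p, hp, h⟩
      · right; rw [List.any_eq_true]; exact ⟨p, hp, h⟩

-- ===== VERDICT (by name: the statement is the Claim_ definition above) =====
theorem is_suspicious_url_spec : Claim_equal_is_suspicious_url := by
  intro url _
  unfold Spec_is_suspicious_url is_suspicious_url is_suspicious_url_alt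
  rw [pvScan_eq]
  simp [PySem.Str.isIn]
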